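-- pv_equiv track=rewrite | github.com/alexander-stage-hoco/project-caldera | src/common/path_normalization.py | validate_paths_consistent
-- ===== SOURCE A (Python) =====
-- def validate_paths_consistent(paths: list[str]) -> tuple[bool, list[str]]:
--     """Check if all paths in the list are consistently formatted.
--
--     Returns a tuple of (is_consistent, issues) where issues is a list of
--     inconsistency descriptions.
--     """
--     issues: list[str] = []
--     if not paths:
--         return True, issues
--
--     # Check for mixed absolute/relative paths
--     absolute_paths = [p for p in paths if p.startswith("/") or p.startswith("\\") or (len(p) > 1 and p[1] == ":")]
--     relative_paths = [p for p in paths if not (p.startswith("/") or p.startswith("\\") or (len(p) > 1 and p[1] == ":"))]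
--
--     if absolute_paths and relative_paths:
--         issues.append(f"Mixed absolute and relative paths: {len(absolute_paths)} absolute, {len(relative_paths)} relative")
--
--     # Check for mixed path separators
--     unix_style = [p for p in paths if "/" in p and "\\" not in p]
--     win_style = [p for p in paths if "\\" in p]
--     if unix_style and win_style:
--         issues.append(f"Mixed path separators: {len(unix_style)} POSIX, {len(win_style)} Windows")
--
--     # Check for case-sensitivity issues (same path with different casing)
--     path_lower_map: dict[str, list[str]] = {}
--     for p in paths:
--         lower = p.lower()
--         if lower not in path_lower_map:
--             path_lower_map[lower] = []
--         path_lower_map[lower].append(p)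
--
--     for lower_path, variants in path_lower_map.items():
--         unique_variants = set(variants)
--         if len(unique_variants) > 1:
--             issues.append(f"Case inconsistency: {sorted(unique_variants)}")
--
--     return len(issues) == 0, issues
-- ===== SOURCE B (Python) =====
-- def validate_paths_consistent(paths: list[str]) -> tuple[bool, list[str]]:
--     """Single-pass check: classify each path once while grouping case variants."""
--     if not paths:
--         return True, []
--     abs_n = rel_n = unix_n = win_n = 0
--     groups: dict[str, set[str]] = {}
--     for p in paths:
--         if p.startswith("/") or p.startswith("\\") or (len(p) > 1 and p[1] == ":"):
--             abs_n += 1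
--         else:
--             rel_n += 1
--         if "\\" in p:
--             win_n += 1
--         elif "/" in p:
--             unix_n += 1
--         groups.setdefault(p.lower(), set()).add(p)
--     issues: list[str] = []
--     if abs_n and rel_n:
--         issues.append(f"Mixed absolute and relative paths: {abs_n} absolute, {rel_n} relative")
--     if unix_n and win_n:
--         issues.append(f"Mixed path separators: {unix_n} POSIX, {win_n} Windows")
--     for variants in groups.values():
--         if len(variants) > 1:
--             issues.append(f"Case inconsistency: {sorted(variants)}")
--     return not issues, issues
-- ===== Notes on version B (the rewrite author's own statement) =====
-- stated objective: alternative
-- what changed: Replaced A's four separate filtering passes plus a list-valued grouping dict with a single loop that keeps four counters and a dict of case-variant sets, then emits the same issues from those accumulators.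
import Mathlib
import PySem

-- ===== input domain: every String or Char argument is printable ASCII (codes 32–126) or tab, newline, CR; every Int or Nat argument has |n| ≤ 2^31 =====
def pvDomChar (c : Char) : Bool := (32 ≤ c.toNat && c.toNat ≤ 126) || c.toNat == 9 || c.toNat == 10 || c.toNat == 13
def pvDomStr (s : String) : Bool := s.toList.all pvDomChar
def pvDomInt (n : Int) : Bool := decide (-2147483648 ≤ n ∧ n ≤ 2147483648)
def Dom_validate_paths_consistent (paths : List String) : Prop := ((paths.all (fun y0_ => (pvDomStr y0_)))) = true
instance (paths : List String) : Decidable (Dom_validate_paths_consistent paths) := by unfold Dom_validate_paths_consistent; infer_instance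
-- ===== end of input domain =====

-- B replaces A's four separate filtering passes and list-valued grouping dict by ONE loop keeping
-- four counters and a dict of case-variant sets (objective: alternative decomposition, same cost).

-- ===== PORT A =====
-- shared formatting helpers (the f-strings both Pythons produce, incl. Python's repr of a str list)
def pvIsAbs (p : String) : Bool :=
  PySem.Str.startswith p "/" || PySem.Str.startswith p "\\" ||
    (decide ((1 : Int) < PySem.Str.len p) && (PySem.Str.pyGet? p 1 == some ':'))

def pvMsgAbsRel (a r : Int) : String :=
  "Mixed absolute and relative paths: " ++ PySem.Int.toStr a ++ " absolute, " ++
    PySem.Int.toStr r ++ " relative"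

def pvMsgSep (u w : Int) : String :=
  "Mixed path separators: " ++ PySem.Int.toStr u ++ " POSIX, " ++ PySem.Int.toStr w ++ " Windows"

-- Python repr of one character inside a str literal quoted by q (exact on the Dom alphabet)
def pvReprChar (q c : Char) : List Char :=
  if c = '\\' then ['\\', '\\']
  else if c = q then ['\\', q]
  else if c = Char.ofNat 9 then ['\\', 't']
  else if c = Char.ofNat 10 then ['\\', 'n']
  else if c = Char.ofNat 13 then ['\\', 'r']
  else [c]

-- Python repr(s) (exact on the Dom alphabet: quote choice, backslash/quote/tab/newline/CR escapes)
def pvReprStr (s : String) : String :=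
  let cs := s.toList
  let q : Char := if '\'' ∈ cs ∧ '"' ∉ cs then '"' else '\''
  String.ofList (q :: (cs.flatMap (pvReprChar q) ++ [q]))

-- f"Case inconsistency: {sorted(variants)}" for a set of variants
def pvMsgCase (uv : PySem.Set String) : String :=
  "Case inconsistency: [" ++
    PySem.Str.join ", " ((PySem.List.sorted uv (fun x => x) false).map pvReprStr) ++ "]"

def validate_paths_consistent (paths : List String) : Bool × List String :=
  if paths = [] then (true, [])
  else
    let absolute_paths := paths.filter pvIsAbs
    let relative_paths := paths.filter (fun p => !(pvIsAbs p))
    let issues : List String :=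
      if absolute_paths ≠ [] ∧ relative_paths ≠ [] then
        [pvMsgAbsRel (absolute_paths.length : Int) (relative_paths.length : Int)]
      else []
    let unix_style := paths.filter (fun p => PySem.Str.isIn "/" p && !(PySem.Str.isIn "\\" p))
    let win_style := paths.filter (fun p => PySem.Str.isIn "\\" p)
    let issues :=
      if unix_style ≠ [] ∧ win_style ≠ [] then
        issues ++ [pvMsgSep (unix_style.length : Int) (win_style.length : Int)]
      else issues
    let path_lower_map : PySem.Dict String (List String) :=
      paths.foldl (fun d p =>
        let lower := PySem.Str.lower p
        let d := if d.contains lower then d else d.insert lower []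
        d.modify lower [] (fun v => v ++ [p])) PySem.Dict.empty
    let issues := path_lower_map.items.foldl (fun acc kv =>
      let uv : PySem.Set String := PySem.Set.ofList kv.2
      if 1 < uv.length then acc ++ [pvMsgCase uv] else acc) issues
    (decide (issues.length = 0), issues)

-- ===== PORT B =====
-- one pass: four counters + dict lower-cased path ↦ set of variants
def pvStepB (s : Int × Int × Int × Int × PySem.Dict String (PySem.Set String)) (p : String) :
    Int × Int × Int × Int × PySem.Dict String (PySem.Set String) :=
  ((if pvIsAbs p then s.1 + 1 else s.1),
   (if pvIsAbs p then s.2.1 else s.2.1 + 1),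
   (if PySem.Str.isIn "\\" p then s.2.2.1
    else if PySem.Str.isIn "/" p then s.2.2.1 + 1 else s.2.2.1),
   (if PySem.Str.isIn "\\" p then s.2.2.2.1 + 1 else s.2.2.2.1),
   s.2.2.2.2.modify (PySem.Str.lower p) PySem.Set.empty (fun g => PySem.Set.add g p))

def validate_paths_consistent_alt (paths : List String) : Bool × List String :=
  if paths = [] then (true, [])
  else
    let st := paths.foldl pvStepB
      ((0 : Int), (0 : Int), (0 : Int), (0 : Int),
        (PySem.Dict.empty : PySem.Dict String (PySem.Set String)))
    let issues : List String :=
      if st.1 ≠ 0 ∧ st.2.1 ≠ 0 then [pvMsgAbsRel st.1 st.2.1] else []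
    let issues :=
      if st.2.2.1 ≠ 0 ∧ st.2.2.2.1 ≠ 0 then issues ++ [pvMsgSep st.2.2.1 st.2.2.2.1] else issues
    let issues := st.2.2.2.2.values.foldl (fun acc v =>
      if 1 < v.length then acc ++ [pvMsgCase v] else acc) issues
    (decide (issues = []), issues)

-- ===== PRECONDITION & SPEC =====
def Spec_validate_paths_consistent (paths : List String) (out : Bool × List String) : Prop := out = validate_paths_consistent_alt paths
instance (paths : List String) (out : Bool × List String) : Decidable (Spec_validate_paths_consistent paths out) := by unfold Spec_validate_paths_consistent; infer_instance

-- ===== CLAIM (what is proved, stated in full; the proofs are below) =====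
def Claim_equal_validate_paths_consistent : Prop := ∀ (paths : List String), Dom_validate_paths_consistent paths → Spec_validate_paths_consistent paths (validate_paths_consistent paths)

-- ===== LEMMAS AND PROOFS =====

-- A's grouping step collapses to a single insert
lemma pvStepA_eq (d : PySem.Dict String (List String)) (p : String) :
    (let lower := PySem.Str.lower p
     let d' := if d.contains lower then d else d.insert lower []
     d'.modify lower [] (fun v => v ++ [p]))
    = d.insert (PySem.Str.lower p) (d.getD (PySem.Str.lower p) [] ++ [p]) := by
  by_cases h : d.contains (PySem.Str.lower p)
  · simp [h, PySem.Dict.modify]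
  · have hg : d.getD (PySem.Str.lower p) [] = [] := by
      apply PySem.Dict.getD_of_not_contains; simpa using h
    simp only [h, Bool.false_eq_true, if_false, PySem.Dict.modify,
      PySem.Dict.getD_insert_self, PySem.Dict.insert_insert_self, hg]

-- value-wise image of the grouping dict under Set.ofList
def pvFm (d : PySem.Dict String (List String)) : PySem.Dict String (PySem.Set String) :=
  ⟨d.items.map (fun kv => (kv.1, PySem.Set.ofList kv.2))⟩

lemma pvFm_contains (d : PySem.Dict String (List String)) (k : String) :
    (pvFm d).contains k = d.contains k := by
  simp [pvFm, PySem.Dict.contains, List.any_map, Function.comp_def]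

lemma pvFm_getD (d : PySem.Dict String (List String)) (k : String) :
    (pvFm d).getD k PySem.Set.empty = PySem.Set.ofList (d.getD k []) := by
  simp only [pvFm, PySem.Dict.getD, PySem.Dict.get?, List.find?_map, Function.comp_def]
  cases h : d.items.find? (fun p => p.1 == k) <;>
    simp [h, PySem.Set.empty, PySem.Set.ofList]

lemma pvFm_insert (d : PySem.Dict String (List String)) (k : String) (v : List String) :
    pvFm (d.insert k v) = (pvFm d).insert k (PySem.Set.ofList v) := by
  simp only [PySem.Dict.insert, pvFm_contains]
  by_cases h : d.contains k
  · simp only [h, if_true, pvFm, List.map_map]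
    congr 1
    apply List.map_congr_left
    intro kv _
    by_cases hk : kv.1 = k <;> simp [hk]
  · simp [h, pvFm]

lemma pvOfList_append (v : List String) (p : String) :
    PySem.Set.ofList (v ++ [p]) = PySem.Set.add (PySem.Set.ofList v) p := by
  simp [PySem.Set.ofList, List.foldl_append]

-- B's dict fold is the value-wise image of A's dict fold
lemma pvDicts_rel (paths : List String) (d : PySem.Dict String (List String)) :
    paths.foldl (fun g p =>
        g.modify (PySem.Str.lower p) PySem.Set.empty (fun s => PySem.Set.add s p)) (pvFm d)
    = pvFm (paths.foldl (fun d p =>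
        let lower := PySem.Str.lower p
        let d := if d.contains lower then d else d.insert lower []
        d.modify lower [] (fun v => v ++ [p])) d) := by
  induction paths generalizing d with
  | nil => rfl
  | cons p t ih =>
    simp only [List.foldl_cons]
    rw [pvStepA_eq]
    have hstep : (pvFm d).modify (PySem.Str.lower p) PySem.Set.empty (fun s => PySem.Set.add s p)
        = pvFm (d.insert (PySem.Str.lower p) (d.getD (PySem.Str.lower p) [] ++ [p])) := by
      rw [PySem.Dict.modify, pvFm_getD, pvFm_insert, pvOfList_append]
    rw [hstep, ih]

-- the same, from the empty dict on both sides
lemma pvDicts_rel' (paths : List String) :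
    paths.foldl (fun g p =>
        g.modify (PySem.Str.lower p) PySem.Set.empty (fun s => PySem.Set.add s p))
      PySem.Dict.empty
    = pvFm (paths.foldl (fun d p =>
        let lower := PySem.Str.lower p
        let d := if d.contains lower then d else d.insert lower []
        d.modify lower [] (fun v => v ++ [p])) PySem.Dict.empty) :=
  pvDicts_rel paths PySem.Dict.empty

-- B's one-pass fold splits into four counts and the dict fold
lemma pvFoldB_eq (paths : List String) (a r u w : Int)
    (g : PySem.Dict String (PySem.Set String)) :
    paths.foldl pvStepB (a, r, u, w, g) =
      (a + (paths.countP pvIsAbs : Int),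
       r + (paths.countP (fun p => !(pvIsAbs p)) : Int),
       u + (paths.countP (fun p => PySem.Str.isIn "/" p && !(PySem.Str.isIn "\\" p)) : Int),
       w + (paths.countP (fun p => PySem.Str.isIn "\\" p) : Int),
       paths.foldl (fun g p =>
         g.modify (PySem.Str.lower p) PySem.Set.empty (fun s => PySem.Set.add s p)) g) := by
  induction paths generalizing a r u w g with
  | nil => simp
  | cons p t ih =>
    simp only [List.foldl_cons, pvStepB, List.countP_cons]
    rw [ih]
    cases h1 : pvIsAbs p <;> cases h2 : PySem.Str.isIn "\\" p <;>
      cases h3 : PySem.Str.isIn "/" p <;>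
      · refine Prod.ext ?_ (Prod.ext ?_ (Prod.ext ?_ (Prod.ext ?_ rfl))) <;>
          · simp only [h1, h2, h3, Bool.false_eq_true, Bool.true_eq_false, Bool.not_true,
              Bool.not_false, Bool.and_true, Bool.and_false, if_true, if_false]
            push_cast
            ring

lemma pvCnt_val (l : List String) (p : String → Bool) :
    (0 : Int) + (l.countP p : Int) = ((l.filter p).length : Int) := by
  rw [List.countP_eq_length_filter]; ring

lemma pvFm_values (d : PySem.Dict String (List String)) :
    (pvFm d).values = d.items.map (fun kv => PySem.Set.ofList kv.2) := by
  simp [pvFm, PySem.Dict.values, List.map_map, Function.comp_def]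

-- ===== VERDICT (by name: the statement is the Claim_ definition above) =====
theorem validate_paths_consistent_spec : Claim_equal_validate_paths_consistent := by
  intro paths _
  unfold Spec_validate_paths_consistent validate_paths_consistent validate_paths_consistent_alt
  by_cases hnil : paths = []
  · simp [hnil]
  · simp only [hnil, if_false]
    rw [pvFoldB_eq, pvDicts_rel']
    simp only [pvFm_values, List.foldl_map, pvCnt_val]
    simp only [ne_eq, Int.natCast_eq_zero, List.length_eq_zero_iff]
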